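-- pv_equiv track=rewrite | github.com/ouvwte/scientific-programming | scientific programming/270.py | parse_gene_paths
-- ===== SOURCE A (Python) =====
-- def parse_gene_paths(table_text: str) -> dict:
--     from collections import defaultdict
--     gene_dict = defaultdict(lambda: defaultdict(int))
--
--     lines = table_text.strip().split('\n')
--
--     for line in lines:
--         parts = line.split('\t')
--         if len(parts) < 3:
--             continue
--
--         path_name = parts[0]
--         genes = parts[2:]
--
--         words_in_path = set(path_name.split('_'))
--
--         for gene in genes:
--             if gene:
--                 for word in words_in_path:
--                     gene_dict[gene][word] += 1
--
--     return gene_dict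
-- ===== SOURCE B (Python) =====
-- def parse_gene_paths(table_text: str) -> dict:
--     from collections import defaultdict, Counter
--     # Phase 1: group -- collect, per gene, the flat list of path words (one batch per hit).
--     gene_words = defaultdict(list)
--     for line in table_text.strip().split('\n'):
--         parts = line.split('\t')
--         if len(parts) >= 3:
--             words = set(parts[0].split('_'))
--             for gene in parts[2:]:
--                 if gene:
--                     gene_words[gene].extend(words)
--     # Phase 2: count each gene's word list in one Counter pass.
--     gene_dict = defaultdict(lambda: defaultdict(int))
--     for gene, ws in gene_words.items():
--         gene_dict[gene] = defaultdict(int, Counter(ws))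
--     return gene_dict
-- ===== Notes on version B (the rewrite author's own statement) =====
-- stated objective: alternative
-- what changed: A increments a nested defaultdict counter word-by-word inside the line loop; B first groups a flat word list per gene (extend), then builds each gene's counts with one Counter pass per gene.
import Mathlib
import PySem

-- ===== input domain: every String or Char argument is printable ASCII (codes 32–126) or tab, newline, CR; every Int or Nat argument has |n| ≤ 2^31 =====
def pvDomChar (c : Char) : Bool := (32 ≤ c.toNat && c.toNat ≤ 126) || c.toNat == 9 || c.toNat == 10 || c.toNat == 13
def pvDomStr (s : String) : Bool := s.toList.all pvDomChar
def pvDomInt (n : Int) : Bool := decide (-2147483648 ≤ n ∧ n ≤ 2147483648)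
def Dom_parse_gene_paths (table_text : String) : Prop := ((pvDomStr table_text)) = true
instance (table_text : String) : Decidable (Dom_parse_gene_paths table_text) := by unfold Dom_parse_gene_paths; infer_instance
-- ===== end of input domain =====

-- B replaces A's fused per-line nested counter increments by a two-phase pipeline (group all path
-- words per gene, then one Counter pass per gene); objective: alternative decomposition, same cost.
-- Return-value equivalence only; neither program mutates its argument.

-- shared helper: s.split(sep) for a non-empty literal sep (split? is none only for sep = "")
def pvSplit (s sep : String) : List String := (PySem.Str.split? s sep).getD []

-- ===== PORT A =====
def parse_gene_paths (table_text : String) : List (String × List (String × Int)) :=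
  let lines := pvSplit (PySem.Str.strip table_text) "\n"
  let gene_dict : PySem.Dict String (PySem.Dict String Int) :=
    lines.foldl (fun d line =>
      let parts := pvSplit line "\t"
      if parts.length < 3 then d
      else
        let path_name := PySem.List.pyGetD parts 0 ""
        let genes := PySem.List.slice parts (some 2) none
        let words_in_path := PySem.Set.ofList (pvSplit path_name "_")
        genes.foldl (fun d gene =>
          if gene ≠ "" then
            words_in_path.foldl (fun d word =>
              d.modify gene PySem.Dict.empty (fun i => i.modify word 0 (· + 1))) d
          else d) d)
      PySem.Dict.empty
  gene_dict.items.map (fun p => (p.1, p.2.items))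

-- ===== PORT B =====
def parse_gene_paths_alt (table_text : String) : List (String × List (String × Int)) :=
  let gene_words : PySem.Dict String (List String) :=
    (pvSplit (PySem.Str.strip table_text) "\n").foldl (fun d line =>
      let parts := pvSplit line "\t"
      if parts.length ≥ 3 then
        let words := PySem.Set.ofList (pvSplit (PySem.List.pyGetD parts 0 "") "_")
        (PySem.List.slice parts (some 2) none).foldl (fun d gene =>
          if gene ≠ "" then d.modify gene [] (· ++ words) else d) d
      else d) PySem.Dict.empty
  let gene_dict : PySem.Dict String (PySem.Dict String Int) :=
    gene_words.items.foldl (fun gd p => gd.insert p.1 (PySem.Dict.counter p.2)) PySem.Dict.empty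
  gene_dict.items.map (fun p => (p.1, p.2.items))

-- ===== PRECONDITION & SPEC =====
def Spec_parse_gene_paths (table_text : String) (out : List (String × List (String × Int))) : Prop := out = parse_gene_paths_alt table_text
instance (table_text : String) (out : List (String × List (String × Int))) : Decidable (Spec_parse_gene_paths table_text out) := by unfold Spec_parse_gene_paths; infer_instance

-- ===== CLAIM (what is proved, stated in full; the proofs are below) =====
def Claim_equal_parse_gene_paths : Prop := ∀ (table_text : String), Dom_parse_gene_paths table_text → Spec_parse_gene_paths table_text (parse_gene_paths table_text)

-- ===== LEMMAS AND PROOFS =====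

-- the split helper never returns [] (Python's s.split(sep) always yields at least one piece)
theorem pv_go_ne_nil (sep : List Char) (fuel : Nat) (l cur : List Char) (acc : List (List Char)) :
    PySem.Chars.splitOn.go sep fuel l cur acc ≠ [] := by
  induction fuel generalizing l cur acc with
  | zero => simp [PySem.Chars.splitOn.go]
  | succ n ih =>
    cases l with
    | nil => simp [PySem.Chars.splitOn.go]
    | cons c rest =>
      rw [PySem.Chars.splitOn.go]
      split
      · exact ih _ _ _
      · exact ih _ _ _

theorem pvSplit_ne_nil (s sep : String) (h : sep.toList ≠ []) : pvSplit s sep ≠ [] := by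
  simp [pvSplit, PySem.Str.split?, PySem.Chars.split?, List.isEmpty_iff, h,
    PySem.Chars.splitOn]
  exact pv_go_ne_nil _ _ _ _ _

theorem pvWords_ne_nil (s : String) : PySem.Set.ofList (pvSplit s "_") ≠ [] := by
  have h : pvSplit s "_" ≠ [] := pvSplit_ne_nil s "_" (by decide)
  cases hx : pvSplit s "_" with
  | nil => exact absurd hx h
  | cons a t =>
    intro hnil
    have ha : a ∈ PySem.Set.ofList (a :: t) :=
      (PySem.Set.mem_ofList _ _).mpr List.mem_cons_self
    rw [hnil] at ha
    exact List.not_mem_nil ha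

-- invariant relating A's nested counting dict to B's per-gene word-list dict
def pvR (dA : PySem.Dict String (PySem.Dict String Int))
    (dW : PySem.Dict String (List String)) : Prop :=
  dA.items = dW.items.map (fun p => (p.1, PySem.Dict.counter p.2))

theorem pvR_keys {dA : PySem.Dict String (PySem.Dict String Int)}
    {dW : PySem.Dict String (List String)} (h : pvR dA dW) : dA.keys = dW.keys := by
  show dA.items.map (·.1) = dW.items.map (·.1)
  rw [h, List.map_map]
  rfl

theorem pvR_contains {dA : PySem.Dict String (PySem.Dict String Int)}
    {dW : PySem.Dict String (List String)} (h : pvR dA dW) (g : String) :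
    dA.contains g = dW.contains g := by
  rw [PySem.Dict.contains_eq_decide_mem_keys, PySem.Dict.contains_eq_decide_mem_keys, pvR_keys h]

-- two consecutive defaultdict updates at the same outer key compose
theorem pv_modify_modify (d : PySem.Dict String (PySem.Dict String Int)) (g : String)
    (f h : PySem.Dict String Int → PySem.Dict String Int) :
    (d.modify g PySem.Dict.empty f).modify g PySem.Dict.empty h
      = d.modify g PySem.Dict.empty (fun v => h (f v)) := by
  simp [PySem.Dict.modify, PySem.Dict.getD_insert_self, PySem.Dict.insert_insert_self]

-- A's inner word loop is one outer-key update whose payload folds over the words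
theorem pv_wordfold (t : List String) (g : String)
    (F : PySem.Dict String Int → PySem.Dict String Int)
    (d : PySem.Dict String (PySem.Dict String Int)) :
    t.foldl (fun d w => d.modify g PySem.Dict.empty (fun i => i.modify w 0 (· + 1)))
        (d.modify g PySem.Dict.empty F)
      = d.modify g PySem.Dict.empty
          (fun i => t.foldl (fun i w => i.modify w 0 (· + 1)) (F i)) := by
  induction t generalizing F with
  | nil => rfl
  | cons w t ih =>
    simp only [List.foldl_cons]
    rw [pv_modify_modify, ih]

-- one gene hit preserves the invariant
theorem pv_stepR {dA : PySem.Dict String (PySem.Dict String Int)}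
    {dW : PySem.Dict String (List String)} (hR : pvR dA dW) (hN : dW.keys.Nodup)
    (g : String) (ws : List String) :
    pvR (dA.modify g PySem.Dict.empty (fun i => ws.foldl (fun i w => i.modify w 0 (· + 1)) i))
        (dW.modify g [] (· ++ ws)) := by
  simp only [PySem.Dict.modify]
  by_cases hc : dW.contains g = true
  · have hcA : dA.contains g = true := by rw [pvR_contains hR]; exact hc
    have hNA : dA.keys.Nodup := by rw [pvR_keys hR]; exact hN
    unfold pvR
    rw [PySem.Dict.items_insert_of_contains _ _ hcA,
        PySem.Dict.items_insert_of_contains _ _ hc, hR,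
        List.map_map, List.map_map]
    apply List.map_congr_left
    intro p hp
    by_cases hpg : p.1 = g
    · have hWv : dW.getD g [] = p.2 := by
        have : (g, p.2) ∈ dW.items := by rw [← hpg]; exact hp
        exact PySem.Dict.getD_of_mem_items dW this hN []
      have hAv : dA.getD g PySem.Dict.empty = PySem.Dict.counter p.2 := by
        have : (g, PySem.Dict.counter p.2) ∈ dA.items := by
          rw [hR]
          exact List.mem_map.mpr ⟨p, hp, by rw [hpg]⟩
        exact PySem.Dict.getD_of_mem_items dA this hNA PySem.Dict.empty
      simp only [Function.comp, hpg, beq_self_eq_true, if_true, hWv, hAv]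
      rw [PySem.Dict.counter_eq_foldl, PySem.Dict.counter_eq_foldl, List.foldl_append]
      simp [PySem.Dict.modify]
    · simp [Function.comp, hpg]
  · have hc' : dW.contains g = false := by simpa using hc
    have hcA : dA.contains g = false := by rw [pvR_contains hR]; exact hc'
    unfold pvR
    rw [PySem.Dict.items_insert_of_not_contains _ _ hcA,
        PySem.Dict.items_insert_of_not_contains _ _ hc', hR,
        PySem.Dict.getD_of_not_contains _ _ hcA, PySem.Dict.getD_of_not_contains _ _ hc']
    simp [PySem.Dict.counter_eq_foldl, PySem.Dict.modify]

theorem pv_nodup_modify (dW : PySem.Dict String (List String)) (g : String)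
    (f : List String → List String) (hN : dW.keys.Nodup) :
    (dW.modify g [] f).keys.Nodup := by
  simp only [PySem.Dict.modify]
  exact PySem.Dict.nodup_keys_insert _ _ _ hN

-- the per-line gene loop preserves the invariant
theorem pv_geneR (ws : List String) (hws : ws ≠ []) (genes : List String) :
    ∀ dA dW, pvR dA dW → dW.keys.Nodup →
      pvR (genes.foldl (fun d gene =>
             if gene ≠ "" then
               ws.foldl (fun d word =>
                 d.modify gene PySem.Dict.empty (fun i => i.modify word 0 (· + 1))) d
             else d) dA)
          (genes.foldl (fun d gene => if gene ≠ "" then d.modify gene [] (· ++ ws) else d) dW)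
        ∧ (genes.foldl (fun d gene => if gene ≠ "" then d.modify gene [] (· ++ ws) else d) dW).keys.Nodup := by
  induction genes with
  | nil => exact fun dA dW h hN => ⟨h, hN⟩
  | cons gene t ih =>
    intro dA dW h hN
    simp only [List.foldl_cons]
    by_cases hg : gene ≠ ""
    · rw [if_pos hg, if_pos hg]
      obtain ⟨w, tws, rfl⟩ : ∃ w tws, ws = w :: tws := by
        cases ws with
        | nil => exact absurd rfl hws
        | cons w tws => exact ⟨w, tws, rfl⟩
      show (pvR (List.foldl _ (List.foldl (fun d word =>
          d.modify gene PySem.Dict.empty (fun i => i.modify word 0 (· + 1)))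
          (dA.modify gene PySem.Dict.empty (fun i => i.modify w 0 (· + 1))) tws) t) _) ∧ _
      rw [pv_wordfold]
      exact ih _ _ (pv_stepR h hN gene (w :: tws)) (pv_nodup_modify _ _ _ hN)
    · rw [if_neg hg, if_neg hg]
      exact ih _ _ h hN

-- the line loop preserves the invariant
theorem pv_lineR (lines : List String) :
    ∀ dA dW, pvR dA dW → dW.keys.Nodup →
      pvR (lines.foldl (fun d line =>
             if (pvSplit line "\t").length < 3 then d
             else
               (PySem.List.slice (pvSplit line "\t") (some 2) none).foldl (fun d gene =>
                 if gene ≠ "" then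
                   (PySem.Set.ofList (pvSplit (PySem.List.pyGetD (pvSplit line "\t") 0 "") "_")).foldl
                     (fun d word =>
                       d.modify gene PySem.Dict.empty (fun i => i.modify word 0 (· + 1))) d
                 else d) d) dA)
          (lines.foldl (fun d line =>
             if (pvSplit line "\t").length ≥ 3 then
               (PySem.List.slice (pvSplit line "\t") (some 2) none).foldl (fun d gene =>
                 if gene ≠ "" then
                   d.modify gene []
                     (· ++ PySem.Set.ofList (pvSplit (PySem.List.pyGetD (pvSplit line "\t") 0 "") "_"))
                 else d) d
             else d) dW)
        ∧ (lines.foldl (fun d line =>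
             if (pvSplit line "\t").length ≥ 3 then
               (PySem.List.slice (pvSplit line "\t") (some 2) none).foldl (fun d gene =>
                 if gene ≠ "" then
                   d.modify gene []
                     (· ++ PySem.Set.ofList (pvSplit (PySem.List.pyGetD (pvSplit line "\t") 0 "") "_"))
                 else d) d
             else d) dW).keys.Nodup := by
  induction lines with
  | nil => exact fun dA dW h hN => ⟨h, hN⟩
  | cons line t ih =>
    intro dA dW h hN
    simp only [List.foldl_cons]
    by_cases hlen : (pvSplit line "\t").length < 3
    · rw [if_pos hlen, if_neg (by omega)]
      exact ih _ _ h hN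
    · rw [if_neg hlen, if_pos (by omega)]
      obtain ⟨h', hN'⟩ :=
        pv_geneR _ (pvWords_ne_nil (PySem.List.pyGetD (pvSplit line "\t") 0 ""))
          (PySem.List.slice (pvSplit line "\t") (some 2) none) dA dW h hN
      exact ih _ _ h' hN'

-- assemble the final association lists from the invariant
theorem pv_final (dA : PySem.Dict String (PySem.Dict String Int))
    (dW : PySem.Dict String (List String)) (hR : pvR dA dW) (hN : dW.keys.Nodup) :
    dA.items.map (fun p => (p.1, p.2.items)) =
      (dW.items.foldl (fun gd p => gd.insert p.1 (PySem.Dict.counter p.2))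
          PySem.Dict.empty).items.map (fun p => (p.1, p.2.items)) := by
  rw [PySem.Dict.items_foldl_insert_fresh dW.items (fun p => p.1)
        (fun p => PySem.Dict.counter p.2) PySem.Dict.empty
        (fun a _ => PySem.Dict.contains_empty _) hN]
  rw [hR]
  rfl

-- ===== VERDICT (by name: the statement is the Claim_ definition above) =====
theorem parse_gene_paths_spec : Claim_equal_parse_gene_paths := by
  intro table_text _
  unfold Spec_parse_gene_paths
  simp only [parse_gene_paths, parse_gene_paths_alt]
  obtain ⟨hR, hN⟩ :=
    pv_lineR (pvSplit (PySem.Str.strip table_text) "\n") PySem.Dict.empty PySem.Dict.empty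
      (by unfold pvR; rfl) List.nodup_nil
  exact pv_final _ _ hR hN
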